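-- pv_equiv track=rewrite | github.com/MayaScarlet/binary-search-python | 262-sorting-mail/sorting-mail.py | solve
-- ===== SOURCE A (Python) =====
-- def solve(mailboxes):
--     # Whenever we process a piece of mail mailboxes[i][j],
--     # we enqueue mailboxes[i][j + 1] for processing (if that piece of mail exists.)
--
--     locs = [(i, 0) for i in range(len(mailboxes))]
--     result = []
--     for i, j in locs:
--         if mailboxes[i][j] != "junk":
--             result.append(mailboxes[i][j])
--         if j + 1 < len(mailboxes[i]):
--             locs.append((i, j + 1))
--     return result
-- ===== SOURCE B (Python) =====
-- def solve(mailboxes):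
--     m = max((len(box) for box in mailboxes), default=0)
--     result = []
--     for j in range(m):
--         for box in mailboxes:
--             if j < len(box) and box[j] != "junk":
--                 result.append(box[j])
--     return result
-- ===== Notes on version B (the rewrite author's own statement) =====
-- stated objective: simpler
-- what changed: Replaces A's self-growing work-list of (box,position) pairs with two plain index-bounded nested loops over columns then boxes; no queue of index pairs is built or mutated.
import Mathlib
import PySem

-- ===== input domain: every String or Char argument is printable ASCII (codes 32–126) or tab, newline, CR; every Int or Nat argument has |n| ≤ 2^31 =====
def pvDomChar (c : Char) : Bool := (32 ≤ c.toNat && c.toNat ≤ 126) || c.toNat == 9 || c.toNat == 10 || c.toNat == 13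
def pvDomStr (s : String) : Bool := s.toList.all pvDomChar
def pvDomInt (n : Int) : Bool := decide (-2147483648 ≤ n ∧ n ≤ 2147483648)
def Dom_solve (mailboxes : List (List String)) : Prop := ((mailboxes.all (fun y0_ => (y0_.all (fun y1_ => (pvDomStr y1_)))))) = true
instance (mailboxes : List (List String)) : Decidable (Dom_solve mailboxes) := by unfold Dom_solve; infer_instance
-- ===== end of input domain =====

-- B replaces A's growing work-list/queue with two index-bounded nested loops (columns, then boxes): simpler.
-- A raises IndexError when some mailbox is empty (excluded by Pre_solve); B returns a value there.

-- ===== PORT A =====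
-- A's successor push: if j + 1 < len(mailboxes[i]): locs.append((i, j + 1))
def succOf (mbs : List (List String)) (i j : Nat) : List (Nat × Nat) :=
  if j + 1 < (mbs.getD i []).length then [(i, j + 1)] else []

-- the 'for i, j in locs' loop over the growing list, as a queue recursion;
-- 'none' marks Python's IndexError on mailboxes[i][j] (only reachable outside Pre_solve)
def aLoop (mbs : List (List String)) : List (Nat × Nat) → List String → Option (List String)
  | [], acc => some acc
  | (i, j) :: rest, acc =>
    match (mbs.getD i [])[j]? with
    | none => none
    | some v => aLoop mbs (rest ++ succOf mbs i j) (acc ++ if v ≠ "junk" then [v] else [])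
termination_by q _ => (q.map (fun p => (mbs.getD p.1 []).length - p.2)).sum + q.length
decreasing_by
  simp only [succOf, List.getD_eq_getElem?_getD] at *
  split
  · rename_i hlt
    simp only [List.map_append, List.sum_append, List.map_cons, List.sum_cons, List.map_nil,
      List.sum_nil, List.length_append, List.length_cons, List.length_nil]
    omega
  · simp only [List.append_nil, List.map_cons, List.sum_cons, List.length_cons]
    omega

def solve (mailboxes : List (List String)) : List String :=
  -- locs = [(i, 0) for i in range(len(mailboxes))]; Python raises where aLoop is none (outside Pre_solve)
  (aLoop mailboxes ((List.range mailboxes.length).map (fun i => (i, 0))) []).getD []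

-- ===== PORT B =====
def solve_alt (mailboxes : List (List String)) : List String :=
  -- m = max((len(box) for box in mailboxes), default=0)
  let m := mailboxes.foldl (fun acc box => max acc box.length) 0
  -- for j in range(m): for box in mailboxes: if j < len(box) and box[j] != "junk": result.append(box[j])
  (List.range m).foldl (fun res j =>
    mailboxes.foldl (fun res box =>
      if j < box.length ∧ box.getD j "" ≠ "junk" then res ++ [box.getD j ""] else res) res) []

-- ===== PRECONDITION & SPEC =====
-- Pre_ excludes inputs containing an empty mailbox: there A's mailboxes[i][0] raises IndexError.
def Pre_solve (mailboxes : List (List String)) : Prop := ∀ box ∈ mailboxes, box ≠ []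
instance (mailboxes : List (List String)) : Decidable (Pre_solve mailboxes) := by unfold Pre_solve; infer_instance
def pvWitness_solve : List (List String) := [["a", "junk"], ["junk"], ["b", "c", "d"]]

def Spec_solve (mailboxes : List (List String)) (out : List String) : Prop := out = solve_alt mailboxes
instance (mailboxes : List (List String)) (out : List String) : Decidable (Spec_solve mailboxes out) := by unfold Spec_solve; infer_instance

-- ===== CLAIM (what is proved, stated in full; the proofs are below) =====
def Claim_equal_solve : Prop := ∀ (mailboxes : List (List String)), Dom_solve mailboxes → Pre_solve mailboxes → Spec_solve mailboxes (solve mailboxes)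

-- ===== LEMMAS AND PROOFS =====

-- what A emits / enqueues for one queue entry
def emit1 (mbs : List (List String)) (p : Nat × Nat) : List String :=
  match (mbs.getD p.1 [])[p.2]? with
  | some v => if v ≠ "junk" then [v] else []
  | none => []

-- the queue of one column: every still-live box index, paired with j
def colIdx (mbs : List (List String)) (j : Nat) : List Nat :=
  (List.range mbs.length).filter (fun i => j < (mbs.getD i []).length)
def colQ (mbs : List (List String)) (j : Nat) : List (Nat × Nat) :=
  (colIdx mbs j).map (fun i => (i, j))
def colB (mbs : List (List String)) (j : Nat) : List String :=
  (List.range mbs.length).flatMap (fun i => emit1 mbs (i, j))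

theorem aLoop_round (mbs : List (List String)) (q : List (Nat × Nat)) :
    ∀ (e : List (Nat × Nat)) (acc : List String),
    (∀ p ∈ q, p.2 < (mbs.getD p.1 []).length) →
    aLoop mbs (q ++ e) acc
      = aLoop mbs (e ++ q.flatMap (fun p => succOf mbs p.1 p.2)) (acc ++ q.flatMap (emit1 mbs)) := by
  induction q with
  | nil => intro e acc _; simp
  | cons p q' ih =>
    rintro e acc h
    obtain ⟨i, j⟩ := p
    rw [List.cons_append, aLoop]
    have hj : j < (mbs[i]?.getD []).length := by
      simpa [List.getD_eq_getElem?_getD] using h (i, j) (by simp)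
    have hv : (mbs[i]?.getD [])[j]? = some ((mbs[i]?.getD [])[j]) := List.getElem?_eq_getElem hj
    simp only [List.getD_eq_getElem?_getD, hv]
    rw [List.append_assoc, ih (e ++ succOf mbs i j) _ (fun p hp => h p (by simp [hp]))]
    simp [emit1, List.getD_eq_getElem?_getD, hv, List.append_assoc]

theorem succs_colQ (mbs : List (List String)) (j : Nat) :
    (colQ mbs j).flatMap (fun p => succOf mbs p.1 p.2) = colQ mbs (j + 1) := by
  simp only [colQ, colIdx, List.flatMap_map, succOf, List.getD_eq_getElem?_getD]
  induction (List.range mbs.length) with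
  | nil => simp
  | cons i l ih =>
    by_cases h1 : j + 1 < (mbs[i]?.getD []).length
    · have h0 : j < (mbs[i]?.getD []).length := by omega
      simp [h0, h1, ih]
    · by_cases h0 : j < (mbs[i]?.getD []).length <;> simp [h0, h1, ih]

theorem emits_colQ (mbs : List (List String)) (j : Nat) :
    (colQ mbs j).flatMap (emit1 mbs) = colB mbs j := by
  simp only [colQ, colIdx, colB, List.flatMap_map, List.getD_eq_getElem?_getD]
  induction (List.range mbs.length) with
  | nil => simp
  | cons i l ih =>
    by_cases h0 : j < (mbs[i]?.getD []).length
    · simp [h0, ih]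
    · have hn : (mbs[i]?.getD [])[j]? = none := by
        rw [List.getElem?_eq_none_iff]; omega
      have he : emit1 mbs (i, j) = [] := by
        simp [emit1, List.getD_eq_getElem?_getD, hn]
      simp [h0, ih, he]

theorem init_le_foldl_max (l : List (List String)) :
    ∀ (init : Nat), init ≤ l.foldl (fun acc box => max acc box.length) init := by
  induction l with
  | nil => intro init; exact le_refl _
  | cons x xs ihx =>
    intro init
    simp only [List.foldl_cons]
    exact le_trans (le_max_left init x.length) (ihx (max init x.length))

theorem len_le_foldl_max (mbs : List (List String)) :
    ∀ (init : Nat) (box : List String), box ∈ mbs →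
      box.length ≤ mbs.foldl (fun acc box => max acc box.length) init := by
  induction mbs with
  | nil => intro _ _ h; cases h
  | cons b l ih =>
    intro init box h
    simp only [List.foldl_cons]
    cases h with
    | head => exact le_trans (le_max_right _ _) (init_le_foldl_max l _)
    | tail _ hmem => exact ih _ _ hmem

theorem aLoop_descend (mbs : List (List String)) :
    ∀ (k j : Nat) (acc : List String),
      (∀ box ∈ mbs, box.length ≤ j + k) →
      aLoop mbs (colQ mbs j) acc
        = some (acc ++ (List.range' j k).flatMap (colB mbs)) := by
  intro k
  induction k with
  | zero =>
    intro j acc h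
    have hnil : colQ mbs j = [] := by
      simp only [colQ, colIdx, List.map_eq_nil_iff, List.filter_eq_nil_iff]
      intro i hi
      simp only [List.mem_range] at hi
      have hb := h _ (List.getElem_mem hi)
      simp [List.getD_eq_getElem?_getD, List.getElem?_eq_getElem hi]
      omega
    rw [hnil]
    simp [aLoop]
  | succ k ih =>
    intro j acc h
    have hval : ∀ p ∈ colQ mbs j, p.2 < (mbs.getD p.1 []).length := by
      intro p hp
      simp only [colQ, colIdx, List.mem_map, List.mem_filter] at hp
      obtain ⟨i, ⟨_, hfi⟩, rfl⟩ := hp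
      simpa using hfi
    rw [← List.append_nil (colQ mbs j), aLoop_round mbs _ [] acc hval,
      succs_colQ, emits_colQ, List.nil_append,
      ih (j + 1) _ (fun box hb => by have := h box hb; omega)]
    rw [List.range'_succ]
    simp [List.append_assoc]

-- B's per-column emission over boxes = A's per-column emission over box indices
theorem emitBox_eq (mbs : List (List String)) (j i : Nat) :
    emit1 mbs (i, j)
      = (if j < (mbs.getD i []).length ∧ (mbs.getD i []).getD j "" ≠ "junk"
          then [(mbs.getD i []).getD j ""] else []) := by
  simp only [emit1, List.getD_eq_getElem?_getD]
  by_cases hl : j < (mbs[i]?.getD []).length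
  · rw [List.getElem?_eq_getElem hl]
    by_cases hj : (mbs[i]?.getD [])[j] = "junk" <;> simp [hl, hj]
  · rw [List.getElem?_eq_none_iff.mpr (by omega)]
    simp [hl]

theorem range_flatMap (mbs : List (List String)) (F : List String → List String) :
    (List.range mbs.length).flatMap (fun i => F (mbs.getD i [])) = mbs.flatMap F := by
  induction mbs with
  | nil => simp
  | cons b l ih =>
    rw [List.length_cons, List.range_succ_eq_map]
    simp only [List.flatMap_cons, List.flatMap_map, List.getD_cons_zero, List.getD_cons_succ]
    rw [ih]

theorem colB_eq_flatMap (mbs : List (List String)) (j : Nat) :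
    colB mbs j = mbs.flatMap (fun box =>
      if j < box.length ∧ box.getD j "" ≠ "junk" then [box.getD j ""] else []) := by
  unfold colB
  rw [show (fun i => emit1 mbs (i, j))
      = (fun i => (fun box => if j < box.length ∧ box.getD j "" ≠ "junk"
          then [box.getD j ""] else []) (mbs.getD i []))
      from funext fun i => emitBox_eq mbs j i]
  exact range_flatMap mbs (fun box =>
    if j < box.length ∧ box.getD j "" ≠ "junk" then [box.getD j ""] else [])

theorem solve_alt_eq (mbs : List (List String)) :
    solve_alt mbs
      = (List.range (mbs.foldl (fun acc box => max acc box.length) 0)).flatMap (colB mbs) := by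
  unfold solve_alt
  have hinner : ∀ (j : Nat) (res : List String),
      mbs.foldl (fun res box =>
        if j < box.length ∧ box.getD j "" ≠ "junk" then res ++ [box.getD j ""] else res) res
      = res ++ colB mbs j := by
    intro j res
    rw [PySem.List.foldl_append_ite]
    congr 1
    -- colB over box indices equals the filter-map over the boxes themselves
    rw [colB_eq_flatMap mbs j]
    simp only [List.getD_eq_getElem?_getD]
    induction mbs with
    | nil => simp
    | cons b l ihb =>
      simp only [Bool.decide_and, ne_eq, decide_not] at ihb
      by_cases hc1 : j < b.length
      · by_cases hc2 : b[j]'hc1 = "junk"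
        · simp [hc1, hc2, ihb]
        · simp [hc1, hc2, ihb]
      · simp [hc1, ihb]
  rw [show (fun (res : List String) (j : Nat) =>
      mbs.foldl (fun res box =>
        if j < box.length ∧ box.getD j "" ≠ "junk" then res ++ [box.getD j ""] else res) res)
      = (fun res j => res ++ colB mbs j) from funext fun res => funext fun j => hinner j res]
  rw [PySem.List.foldl_append_eq_flatMap]
  simp

theorem solve_spec : Claim_equal_solve := by
  intro mbs _ hpre
  unfold Spec_solve solve
  have hq : (List.range mbs.length).map (fun i => (i, 0)) = colQ mbs 0 := by
    unfold colQ colIdx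
    congr 1
    symm
    rw [List.filter_eq_self]
    intro i hi
    simp only [List.mem_range] at hi
    have hb := hpre _ (List.getElem_mem hi)
    simp [List.getD_eq_getElem?_getD, List.getElem?_eq_getElem hi]
    exact List.length_pos_of_ne_nil hb
  rw [hq, aLoop_descend mbs (mbs.foldl (fun acc box => max acc box.length) 0) 0 []
    (fun box hb => by simpa using len_le_foldl_max mbs 0 box hb)]
  rw [solve_alt_eq, ← List.range_eq_range']
  simp
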